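-- pv_equiv track=rewrite | github.com/Haru39M/HandyKey4VR_Server | botsu/test2.py | count_qwerty_combinations
-- ===== SOURCE A (Python) =====
-- QWERTY_MAP = {
--     '0': "tgb",# 左手人差し指
--     '1': "yhn",# 右手人差し指
--     '2': "rfv",# 左手人差し指
--     '3': "ujm",# 右手人差し指
--     '4': "edc",# 左手中指
--     '5': "ik",# 右手中指 (「,」も担当範囲)
--     '6': "wsx",# 左手薬指
--     '7': "ol",# 右手薬指 (「.」も担当範囲)
--     '8': "qaz",# 左手小指
--     '9': "p",# 右手小指 (記号も担当範囲)
-- }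
--
-- def text_to_qwerty_index(text):
--     """
--     単語をQWERTYキーボードの指のインデックス（0〜7）に変換する。
--     例: "hello" -> "12555"
--     """
--     index = []
--     # 入力テキストを小文字に統一してループ
--     for char in text.lower():
--         # マップのキーと値（担当文字）でループ
--         for finger_index, letters in QWERTY_MAP.items():
--             if char in letters:
--                 index.append(finger_index)
--                 break # 文字が見つかったら内側のループを抜ける
--
--     return "".join(index)
--
-- def count_qwerty_combinations(word: str) -> int:
--     """
--     単語と同じ指の運びで生成可能な文字列の総数を計算して返す。
--     """
--     # 1. 単語をQWERTYインデックスに変換する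
--     qwerty_index = text_to_qwerty_index(word)
--
--     # 2. インデックスが空の場合（例：入力が"!!"など）は0通りとする
--     if not qwerty_index:
--         return 0
--
--     # 3. 総数を計算する
--     total_combinations = 1
--     for index_char in qwerty_index:
--         # 各インデックスに対応する文字の数を掛け合わせる
--         num_choices = len(QWERTY_MAP[index_char])
--         total_combinations *= num_choices
--
--     return total_combinations
-- ===== SOURCE B (Python) =====
-- QWERTY_MAP = {
--     '0': "tgb",
--     '1': "yhn",
--     '2': "rfv",
--     '3': "ujm",
--     '4': "edc",
--     '5': "ik",
--     '6': "wsx",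
--     '7': "ol",
--     '8': "qaz",
--     '9': "p",
-- }
--
-- def count_qwerty_combinations(word: str) -> int:
--     # group-major: per finger group count how many characters of the word it owns,
--     # then multiply size**hits; correct because multiplication is commutative
--     low = word.lower()
--     total = 1
--     matched = 0
--     for letters in QWERTY_MAP.values():
--         hits = sum(1 for c in low if c in letters)
--         matched += hits
--         total *= len(letters) ** hits
--     return total if matched else 0
-- ===== Notes on version B (the rewrite author's own statement) =====
-- stated objective: alternative
-- what changed: B is group-major instead of character-major: it never builds A's intermediate QWERTY-index string and never multiplies per character; for each of the 10 finger groups it counts how many characters of the lowered word fall in that group and multiplies size**hits, which is correct because integer multiplication is commutative.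
import Mathlib
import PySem

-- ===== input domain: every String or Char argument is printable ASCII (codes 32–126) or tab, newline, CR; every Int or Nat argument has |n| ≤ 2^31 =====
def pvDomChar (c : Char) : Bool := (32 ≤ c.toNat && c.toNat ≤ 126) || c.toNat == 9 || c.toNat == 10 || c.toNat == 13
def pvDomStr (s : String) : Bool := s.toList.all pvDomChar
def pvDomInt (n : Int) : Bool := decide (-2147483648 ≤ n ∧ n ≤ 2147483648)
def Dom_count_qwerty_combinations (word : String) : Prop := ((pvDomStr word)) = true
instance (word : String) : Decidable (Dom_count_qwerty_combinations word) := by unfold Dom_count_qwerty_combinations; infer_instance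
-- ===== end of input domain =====

-- B is group-major (per finger group: count its hits in the word, multiply size**hits)
-- instead of A's character-major two passes through an intermediate index string
-- (objective: alternative; equal because multiplication commutes).

-- ===== PORT A =====
def qwertyMap : List (Char × String) :=
  [('0', "tgb"), ('1', "yhn"), ('2', "rfv"), ('3', "ujm"), ('4', "edc"),
   ('5', "ik"), ('6', "wsx"), ('7', "ol"), ('8', "qaz"), ('9', "p")]

-- the inner 'for finger_index, letters in QWERTY_MAP.items(): if char in letters: … break'
def qwertyScan (c : Char) : List (Char × String) → Option Char
  | [] => none
  | (k, v) :: rest => if c ∈ v.toList then some k else qwertyScan c rest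

-- the loop of text_to_qwerty_index, accumulating the appended finger indices
def qwertyIndexChars : List Char → List Char
  | [] => []
  | c :: rest =>
    match qwertyScan c qwertyMap with
    | some k => k :: qwertyIndexChars rest
    | none => qwertyIndexChars rest

def text_to_qwerty_index (text : String) : String :=
  String.ofList (qwertyIndexChars (PySem.Str.lower text).toList)

-- QWERTY_MAP[index_char] (the key is always present; default never used)
def qwertyGet (k : Char) : List (Char × String) → String
  | [] => ""
  | (k', v) :: rest => if k = k' then v else qwertyGet k rest

def count_qwerty_combinations (word : String) : Int :=
  let qwerty_index := text_to_qwerty_index word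
  if qwerty_index.toList = [] then 0
  else qwerty_index.toList.foldl (fun acc c => acc * PySem.Str.len (qwertyGet c qwertyMap)) 1

-- ===== PORT B =====
-- the loop over QWERTY_MAP.values() with state (total, matched);
-- 'hits = sum(1 for c in low if c in letters)' is the 0/1-sum, i.e. countP
def count_qwerty_combinations_alt (word : String) : Int :=
  let low := PySem.Str.lower word
  let st := qwertyMap.foldl (fun (st : Int × Nat) p =>
      let hits := low.toList.countP (fun c => decide (c ∈ p.2.toList))
      (st.1 * (PySem.Str.len p.2) ^ hits, st.2 + hits)) (1, 0)
  if st.2 ≠ 0 then st.1 else 0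

-- ===== PRECONDITION & SPEC =====
def Spec_count_qwerty_combinations (word : String) (out : Int) : Prop := out = count_qwerty_combinations_alt word
instance (word : String) (out : Int) : Decidable (Spec_count_qwerty_combinations word out) := by unfold Spec_count_qwerty_combinations; infer_instance

-- ===== CLAIM (what is proved, stated in full; the proofs are below) =====
def Claim_equal_count_qwerty_combinations : Prop := ∀ (word : String), Dom_count_qwerty_combinations word → Spec_count_qwerty_combinations word (count_qwerty_combinations word)

-- ===== LEMMAS AND PROOFS =====

-- group size looked up by A for finger index k
def gsize (k : Char) : Int := PySem.Str.len (qwertyGet k qwertyMap)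

-- B's per-group hit count
def hcnt (v : String) (cs : List Char) : Nat := cs.countP (fun c => decide (c ∈ v.toList))

theorem foldl_mul_gsize (l : List Char) (a : Int) :
    l.foldl (fun acc c => acc * gsize c) a = a * (l.map gsize).prod := by
  induction l generalizing a with
  | nil => simp
  | cons c rest ih => simp [ih, mul_assoc]

theorem hcnt_cons (v : String) (c : Char) (cs : List Char) :
    hcnt v (c :: cs) = hcnt v cs + (if c ∈ v.toList then 1 else 0) := by
  simp [hcnt, List.countP_cons]

-- the char-major product and length regrouped by finger group, in one pass over cs
set_option maxHeartbeats 2000000 in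
theorem qwerty_regroup (cs : List Char) :
    ((qwertyIndexChars cs).map gsize).prod
        = 3 ^ hcnt "tgb" cs * 3 ^ hcnt "yhn" cs * 3 ^ hcnt "rfv" cs * 3 ^ hcnt "ujm" cs
          * 3 ^ hcnt "edc" cs * 2 ^ hcnt "ik" cs * 3 ^ hcnt "wsx" cs * 2 ^ hcnt "ol" cs
          * 3 ^ hcnt "qaz" cs * 1 ^ hcnt "p" cs
    ∧ (qwertyIndexChars cs).length
        = hcnt "tgb" cs + hcnt "yhn" cs + hcnt "rfv" cs + hcnt "ujm" cs + hcnt "edc" cs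
          + hcnt "ik" cs + hcnt "wsx" cs + hcnt "ol" cs + hcnt "qaz" cs + hcnt "p" cs := by
  induction cs with
  | nil => constructor <;> simp [qwertyIndexChars, hcnt]
  | cons c rest ih =>
    obtain ⟨ih1, ih2⟩ := ih
    by_cases hc : c ∈ (['t','g','b','y','h','n','r','f','v','u','j','m','e','d','c','i','k','w','s','x','o','l','q','a','z','p'] : List Char)
    · fin_cases hc <;>
        refine ⟨?_, ?_⟩ <;>
        simp [qwertyIndexChars, qwertyScan, qwertyMap, qwertyGet, gsize, hcnt_cons,
          show ("tgb".toList) = ['t','g','b'] from rfl, show ("yhn".toList) = ['y','h','n'] from rfl,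
          show ("rfv".toList) = ['r','f','v'] from rfl, show ("ujm".toList) = ['u','j','m'] from rfl,
          show ("edc".toList) = ['e','d','c'] from rfl, show ("ik".toList) = ['i','k'] from rfl,
          show ("wsx".toList) = ['w','s','x'] from rfl, show ("ol".toList) = ['o','l'] from rfl,
          show ("qaz".toList) = ['q','a','z'] from rfl, show ("p".toList) = ['p'] from rfl, ih1, ih2] <;>
        ring
    · simp only [List.mem_cons, List.not_mem_nil, or_false, not_or] at hc
      obtain ⟨h1,h2,h3,h4,h5,h6,h7,h8,h9,h10,h11,h12,h13,h14,h15,h16,h17,h18,h19,h20,h21,h22,h23,h24,h25,h26⟩ := hc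
      have hscan : qwertyScan c qwertyMap = none := by
        simp [qwertyScan, qwertyMap,
          show ("tgb".toList) = ['t','g','b'] from rfl, show ("yhn".toList) = ['y','h','n'] from rfl,
          show ("rfv".toList) = ['r','f','v'] from rfl, show ("ujm".toList) = ['u','j','m'] from rfl,
          show ("edc".toList) = ['e','d','c'] from rfl, show ("ik".toList) = ['i','k'] from rfl,
          show ("wsx".toList) = ['w','s','x'] from rfl, show ("ol".toList) = ['o','l'] from rfl,
          show ("qaz".toList) = ['q','a','z'] from rfl, show ("p".toList) = ['p'] from rfl,
          h1,h2,h3,h4,h5,h6,h7,h8,h9,h10,h11,h12,h13,h14,h15,h16,h17,h18,h19,h20,h21,h22,h23,h24,h25,h26]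
      have hmem : ∀ v : String, c ∉ v.toList → hcnt v (c :: rest) = hcnt v rest := by
        intro v hv
        rw [hcnt_cons, if_neg hv]
        omega
      constructor <;>
        simp only [qwertyIndexChars, hscan,
          hmem "tgb" (by simp [show ("tgb".toList) = ['t','g','b'] from rfl, h1,h2,h3]), hmem "yhn" (by simp [show ("yhn".toList) = ['y','h','n'] from rfl, h4,h5,h6]), hmem "rfv" (by simp [show ("rfv".toList) = ['r','f','v'] from rfl, h7,h8,h9]),
          hmem "ujm" (by simp [show ("ujm".toList) = ['u','j','m'] from rfl, h10,h11,h12]), hmem "edc" (by simp [show ("edc".toList) = ['e','d','c'] from rfl, h13,h14,h15]), hmem "ik" (by simp [show ("ik".toList) = ['i','k'] from rfl, h16,h17]),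
          hmem "wsx" (by simp [show ("wsx".toList) = ['w','s','x'] from rfl, h18,h19,h20]), hmem "ol" (by simp [show ("ol".toList) = ['o','l'] from rfl, h21,h22]), hmem "qaz" (by simp [show ("qaz".toList) = ['q','a','z'] from rfl, h23,h24,h25]),
          hmem "p" (by simp [show ("p".toList) = ['p'] from rfl, h26])]
      · exact ih1
      · exact ih2

-- ===== VERDICT (by name: the statement is the Claim_ definition above) =====
theorem count_qwerty_combinations_spec : Claim_equal_count_qwerty_combinations := by
  intro word _
  unfold Spec_count_qwerty_combinations count_qwerty_combinations text_to_qwerty_index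
  obtain ⟨h1, h2⟩ := qwerty_regroup (PySem.Str.lower word).toList
  simp only [String.toList_ofList]
  set cs := (PySem.Str.lower word).toList with hcs
  by_cases hidx : qwertyIndexChars cs = []
  · rw [if_pos hidx]
    have hl0 : (qwertyIndexChars cs).length = 0 := by rw [hidx]; rfl
    rw [h2] at hl0
    have hz : ¬(0 + hcnt "tgb" cs + hcnt "yhn" cs + hcnt "rfv" cs + hcnt "ujm" cs + hcnt "edc" cs
        + hcnt "ik" cs + hcnt "wsx" cs + hcnt "ol" cs + hcnt "qaz" cs + hcnt "p" cs ≠ 0) := by omega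
    simp only [hcnt] at hz
    simp only [count_qwerty_combinations_alt, qwertyMap, List.foldl]
    rw [if_neg hz]
  · rw [if_neg hidx,
      show (fun acc c => acc * PySem.Str.len (qwertyGet c qwertyMap)) = (fun acc c => acc * gsize c) from rfl,
      foldl_mul_gsize, h1]
    have hl0 : (qwertyIndexChars cs).length ≠ 0 := by
      simpa [List.length_eq_zero_iff] using hidx
    rw [h2] at hl0
    have hne : (0 + hcnt "tgb" cs + hcnt "yhn" cs + hcnt "rfv" cs + hcnt "ujm" cs + hcnt "edc" cs
        + hcnt "ik" cs + hcnt "wsx" cs + hcnt "ol" cs + hcnt "qaz" cs + hcnt "p" cs ≠ 0) := by omega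
    simp only [hcnt] at hne
    simp only [count_qwerty_combinations_alt, qwertyMap, List.foldl]
    rw [if_pos hne]
    rw [show PySem.Str.len "tgb" = 3 from rfl, show PySem.Str.len "yhn" = 3 from rfl,
      show PySem.Str.len "rfv" = 3 from rfl, show PySem.Str.len "ujm" = 3 from rfl,
      show PySem.Str.len "edc" = 3 from rfl, show PySem.Str.len "ik" = 2 from rfl,
      show PySem.Str.len "wsx" = 3 from rfl, show PySem.Str.len "ol" = 2 from rfl,
      show PySem.Str.len "qaz" = 3 from rfl, show PySem.Str.len "p" = 1 from rfl]
    simp only [hcnt]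
    ring
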